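-- pv_equiv track=rewrite | github.com/ericjardon/python-coding-problems | UNSTRUCTURED/CP-Python/coinflipgame.py | coinflip
-- ===== SOURCE A (Python) =====
-- def coinflip(I, N, Q):
--     # I: 1 for heads (FALSE), 2 for tails (TRUE)
--     # Q: 1 to return #heads, 2 to return #tails
--     # I is a trivial parameter. We start all coins as True.
--     # If I==Q, we return True values, else we return False values.
--     coins = [True for _ in range(N)]
--     count = N
--     for i in range(N):
--         if (N-i) % 2 != 0:  # odd number
--             coins[i] = False
--             count -=1
--
--     if I==Q:
--         return count
--         #return sum(coins)
--     else:
--         return N - count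
-- ===== SOURCE B (Python) =====
-- def coinflip(I, N, Q):
--     # Closed form: after the flips exactly N//2 coins stay True.
--     return N // 2 if I == Q else N - N // 2
-- ===== Notes on version B (the rewrite author's own statement) =====
-- stated objective: faster
-- what changed: Replaces the O(N) list build and flip loop with the closed form N//2 (True coins) / N - N//2 (False coins).
-- outside the precondition, e.g. on coinflip(1, -3, 1): A returns -3, B returns -2; on coinflip(1, -3, 2): A returns 0, B returns -1
import Mathlib
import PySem

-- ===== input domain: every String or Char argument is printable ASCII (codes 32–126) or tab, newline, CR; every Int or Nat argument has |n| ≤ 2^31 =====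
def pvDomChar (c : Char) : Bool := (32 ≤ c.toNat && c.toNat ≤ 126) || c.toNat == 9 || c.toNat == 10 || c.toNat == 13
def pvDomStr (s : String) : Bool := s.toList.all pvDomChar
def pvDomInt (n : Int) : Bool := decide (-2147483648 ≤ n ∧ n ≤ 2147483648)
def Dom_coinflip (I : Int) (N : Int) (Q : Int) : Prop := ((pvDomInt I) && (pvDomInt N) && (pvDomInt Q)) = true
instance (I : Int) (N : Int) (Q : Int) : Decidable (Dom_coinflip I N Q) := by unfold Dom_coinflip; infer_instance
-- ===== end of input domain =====

-- B replaces A's O(N) coin-list flip loop with the closed form N//2 / N - N//2 (objective: faster).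

-- ===== PORT A =====
def coinflip (I : Int) (N : Int) (Q : Int) : Int :=
  -- coins = [True for _ in range(N)]; count = N
  let coins := (PySem.List.pyRange 0 N 1).map (fun _ => true)
  -- for i in range(N): if (N-i) % 2 != 0: coins[i] = False; count -= 1
  let st := (PySem.List.pyRange 0 N 1).foldl
    (fun (st : List Bool × Int) i =>
      if PySem.Int.mod (N - i) 2 ≠ 0 then
        (PySem.List.pySetD st.1 i false, st.2 - 1)   -- i is always in range, so pySetD is exact here
      else st) (coins, N)
  if I == Q then st.2 else N - st.2

-- ===== PORT B =====
def coinflip_alt (I : Int) (N : Int) (Q : Int) : Int :=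
  if I == Q then PySem.Int.floordiv N 2 else N - PySem.Int.floordiv N 2

-- ===== PRECONDITION & SPEC =====
-- Pre_ excludes negative N (a negative number of coins is outside the task's natural domain;
-- A's loop then never runs and it returns the leftover N or 0, an artefact of its initialisation).
def Pre_coinflip (I : Int) (N : Int) (Q : Int) : Prop := 0 ≤ N
instance (I : Int) (N : Int) (Q : Int) : Decidable (Pre_coinflip I N Q) := by unfold Pre_coinflip; infer_instance
def pvWitness_coinflip : Int × Int × Int := (1, 5, 2)

def Spec_coinflip (I : Int) (N : Int) (Q : Int) (out : Int) : Prop := out = coinflip_alt I N Q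
instance (I : Int) (N : Int) (Q : Int) (out : Int) : Decidable (Spec_coinflip I N Q out) := by unfold Spec_coinflip; infer_instance

-- ===== CLAIM (what is proved, stated in full; the proofs are below) =====
def Claim_equal_coinflip : Prop := ∀ (I : Int) (N : Int) (Q : Int), Dom_coinflip I N Q → Pre_coinflip I N Q → Spec_coinflip I N Q (coinflip I N Q)

-- ===== LEMMAS AND PROOFS =====

-- The count component of A's flip loop: starting the scan at a = N - k with count c,
-- the final count is c minus the number of odd values among N-a, …, 1, i.e. (k+1)/2.
theorem coinflip_loop_count (N : Int) (k : Nat) : ∀ (a : Int) (cs : List Bool) (c : Int),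
    a + k = N →
    ((PySem.List.pyRange a N 1).foldl
      (fun (st : List Bool × Int) i =>
        if PySem.Int.mod (N - i) 2 ≠ 0 then (PySem.List.pySetD st.1 i false, st.2 - 1)
        else st) (cs, c)).2 = c - ((k + 1) / 2 : Nat) := by
  induction k with
  | zero =>
    intro a cs c h
    rw [PySem.List.pyRange_one_eq_nil (by omega)]
    simp
  | succ k ih =>
    intro a cs c h
    rw [PySem.List.pyRange_one_cons (by omega)]
    have hNa : N - a = ((k + 1 : Nat) : Int) := by push_cast; omega
    have hm : PySem.Int.mod (N - a) 2 = ((k + 1 : Nat) : Int) % 2 := by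
      rw [hNa, PySem.Int.mod_eq_emod_of_pos (by omega)]
    simp only [List.foldl_cons]
    by_cases hpar : (k + 1) % 2 = 0
    · rw [if_neg (by simp only [hm]; push_cast; omega)]
      rw [ih (a + 1) cs c (by omega)]
      congr 1
      push_cast
      omega
    · rw [if_pos (by simp only [hm]; push_cast; omega)]
      rw [ih (a + 1) _ (c - 1) (by omega)]
      push_cast
      omega

-- ===== VERDICT (by name: the statement is the Claim_ definition above) =====
theorem coinflip_spec : Claim_equal_coinflip := by
  intro I N Q _ hpre
  unfold Pre_coinflip at hpre
  unfold Spec_coinflip coinflip coinflip_alt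
  have hN : (0 : Int) + (N.toNat : Int) = N := by omega
  have hcount := coinflip_loop_count N N.toNat 0
      ((PySem.List.pyRange 0 N 1).map (fun _ => true)) N hN
  have hfd : PySem.Int.floordiv N 2 = ((N.toNat / 2 : Nat) : Int) := by
    rw [show N = ((N.toNat : Nat) : Int) by omega]
    exact_mod_cast PySem.Int.floordiv_natCast N.toNat 2
  simp only [hcount, hfd]
  split
  · omega
  · omega
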